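-- pv_equiv track=rewrite | github.com/Prii15/IA_AprendizadoMaq | QLearning/QLearning_Python.py | estado
-- ===== SOURCE A (Python) =====
-- COL = 5
--
-- LIN = 5
--
-- def estado(x, y):
--     s = 0
--     c = 0
--     for j in range(LIN):
--         for i in range(COL):
--             if (x == i) and (y == j):
--                 s = c
--             c += 1
--     return s
-- ===== SOURCE B (Python) =====
-- COL = 5
--
-- LIN = 5
--
-- def estado(x, y):
--     # closed form: linear index if (x, y) is inside the grid, else 0
--     if x in range(COL) and y in range(LIN):
--         return int(y) * COL + int(x)
--     return 0
-- ===== Notes on version B (the rewrite author's own statement) =====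
-- stated objective: simpler
-- what changed: replaced the 25-iteration double scan over all grid cells with a bounds test and the closed-form linear index y*COL + x
import Mathlib
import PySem

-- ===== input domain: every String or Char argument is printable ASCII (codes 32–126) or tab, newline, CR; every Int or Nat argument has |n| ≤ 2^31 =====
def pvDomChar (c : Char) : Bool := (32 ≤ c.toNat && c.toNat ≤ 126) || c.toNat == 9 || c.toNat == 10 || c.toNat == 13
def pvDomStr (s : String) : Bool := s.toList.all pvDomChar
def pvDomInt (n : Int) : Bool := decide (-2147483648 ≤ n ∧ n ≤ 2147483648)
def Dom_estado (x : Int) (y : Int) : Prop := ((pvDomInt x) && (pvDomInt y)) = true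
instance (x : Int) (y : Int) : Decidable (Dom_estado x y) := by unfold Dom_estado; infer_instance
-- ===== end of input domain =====

-- B replaces A's double scan over every grid cell with a bounds test and the closed-form index y*COL + x (simpler).

-- ===== PORT A =====
-- s = 0; c = 0; for j in range(LIN): for i in range(COL): if x==i and y==j: s = c; c += 1; return s
def estado (x : Int) (y : Int) : Int :=
  (((PySem.List.pyRange 0 5 1).foldl (fun (st : Int × Int) j =>
    (PySem.List.pyRange 0 5 1).foldl (fun (st : Int × Int) i =>
      ((if x == i && y == j then st.2 else st.1), st.2 + 1)) st) (0, 0))).1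

-- ===== PORT B =====
-- if x in range(COL) and y in range(LIN): return int(y)*COL + int(x) else 0
def estado_alt (x : Int) (y : Int) : Int :=
  if 0 ≤ x ∧ x < 5 ∧ 0 ≤ y ∧ y < 5 then y * 5 + x else 0

-- ===== PRECONDITION & SPEC =====
def Spec_estado (x : Int) (y : Int) (out : Int) : Prop := out = estado_alt x y
instance (x : Int) (y : Int) (out : Int) : Decidable (Spec_estado x y out) := by unfold Spec_estado; infer_instance

-- ===== CLAIM (what is proved, stated in full; the proofs are below) =====
def Claim_equal_estado : Prop := ∀ (x : Int) (y : Int), Dom_estado x y → Spec_estado x y (estado x y)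

-- ===== LEMMAS AND PROOFS =====
theorem pyRange05 : PySem.List.pyRange 0 5 1 = [0, 1, 2, 3, 4] := by
  rw [PySem.List.pyRange_one]; decide

-- one row of A's scan: from state (s, c) it reaches (if the cell is in this row then c + x else s, c + 5)
theorem estado_inner_row (x y j : Int) (st : Int × Int) :
  List.foldl (fun (st : Int × Int) i => ((if x == i && y == j then st.2 else st.1), st.2 + 1)) st [0, 1, 2, 3, 4]
  = ((if 0 ≤ x ∧ x < 5 ∧ y = j then st.2 + x else st.1), st.2 + 5) := by
  simp only [List.foldl, Bool.and_eq_true, beq_iff_eq, Prod.mk.injEq]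
  constructor
  · split_ifs <;> omega
  · omega

-- ===== VERDICT (by name: the statement is the Claim_ definition above) =====
theorem estado_spec : Claim_equal_estado := by
  intro x y _
  unfold Spec_estado estado estado_alt
  rw [pyRange05]
  simp only [estado_inner_row]
  simp only [List.foldl_cons, List.foldl_nil]
  split_ifs <;> omega
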